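-- pv_equiv track=rewrite | github.com/TeikiRaihauti/SourceToSemantic | Results/Stics_soil_temperature/8/Tempprofile_code.py | layer_thickness2depth
-- ===== SOURCE A (Python) =====
-- def layer_thickness2depth(layer_thick):
--     """
--     Converts layer thicknesses to cumulative depths.
--     Input:
--       - layer_thick: list of layer thicknesses (cm)
--     Output:
--       - layer_depth: list of cumulative bottom depths for layers (cm)
--                      For zero-thickness layers, depth is 0.
--     """
--     layers_nb = len(layer_thick)
--     layer_depth = [0] * layers_nb
--     running = 0
--     for z in range(layers_nb):
--         if layer_thick[z] != 0:
--             running += layer_thick[z]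
--             layer_depth[z] = running
--         else:
--             layer_depth[z] = 0
--     return layer_depth
-- ===== SOURCE B (Python) =====
-- def layer_thickness2depth(layer_thick):
--     """
--     Converts layer thicknesses to cumulative depths.
--     Right-to-left formulation: the depth of layer i equals the grand total
--     minus the thicknesses of all layers after i, so walk the list backwards,
--     subtracting from the total, and build the output back-to-front.
--     For zero-thickness layers the depth is 0.
--     """
--     remaining = sum(layer_thick)
--     out = []
--     for t in reversed(layer_thick):
--         out.append(remaining if t != 0 else 0)
--         remaining -= t
--     out.reverse()
--     return out
-- ===== Notes on version B (the rewrite author's own statement) =====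
-- stated objective: alternative
-- what changed: A walks the list left-to-right keeping a conditional running sum and writing into a preallocated list by index; B instead computes the grand total once and walks the list right-to-left, subtracting each thickness from the total to get each layer's bottom depth (depth_i = total - sum of later thicknesses), building the output back-to-front and reversing it.
import Mathlib
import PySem

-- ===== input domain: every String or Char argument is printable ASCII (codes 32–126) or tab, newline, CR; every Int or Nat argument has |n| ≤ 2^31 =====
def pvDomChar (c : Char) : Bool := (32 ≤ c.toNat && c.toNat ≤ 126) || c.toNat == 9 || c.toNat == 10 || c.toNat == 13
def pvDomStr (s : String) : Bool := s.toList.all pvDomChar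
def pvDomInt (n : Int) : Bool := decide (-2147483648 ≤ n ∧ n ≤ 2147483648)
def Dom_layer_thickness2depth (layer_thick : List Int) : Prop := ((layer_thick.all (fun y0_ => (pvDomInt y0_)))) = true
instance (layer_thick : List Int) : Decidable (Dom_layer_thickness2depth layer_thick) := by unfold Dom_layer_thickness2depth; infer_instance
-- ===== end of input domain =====

-- B replaces A's left-to-right conditional running-sum loop by a right-to-left walk that
-- subtracts each thickness from the precomputed grand total, building the output
-- back-to-front (alternative derivation, same O(n) cost, identical return value).

-- ===== PORT A =====
-- A: preallocated result list, one loop over indices, conditional running sum + index write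
def layer_thickness2depth (layer_thick : List Int) : List Int :=
  let layers_nb : Nat := layer_thick.length
  let layer_depth : List Int := List.replicate layers_nb 0
  ((PySem.List.pyRange 0 (layers_nb : Int) 1).foldl
    (fun (st : List Int × Int) (z : Int) =>
      let v := PySem.List.pyGetD layer_thick z 0   -- layer_thick[z]; z is always in range here
      if v ≠ 0 then
        (PySem.List.pySetD st.1 z (st.2 + v), st.2 + v)
      else
        (PySem.List.pySetD st.1 z 0, st.2))
    (layer_depth, 0)).1

-- ===== PORT B =====
-- B: remaining := sum; loop over reversed list appending (remaining if t != 0 else 0),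
-- subtracting t each step; reverse the built list at the end
def layer_thickness2depth_alt (layer_thick : List Int) : List Int :=
  let remaining : Int := layer_thick.sum
  let res := layer_thick.reverse.foldl
    (fun (st : List Int × Int) (t : Int) =>
      (st.1 ++ [if t ≠ 0 then st.2 else 0], st.2 - t))
    ([], remaining)
  res.1.reverse

-- ===== PRECONDITION & SPEC =====
def Spec_layer_thickness2depth (layer_thick : List Int) (out : List Int) : Prop := out = layer_thickness2depth_alt layer_thick
instance (layer_thick : List Int) (out : List Int) : Decidable (Spec_layer_thickness2depth layer_thick out) := by unfold Spec_layer_thickness2depth; infer_instance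

-- ===== CLAIM (what is proved, stated in full; the proofs are below) =====
def Claim_equal_layer_thickness2depth : Prop := ∀ (layer_thick : List Int), Dom_layer_thickness2depth layer_thick → Spec_layer_thickness2depth layer_thick (layer_thickness2depth layer_thick)

-- ===== LEMMAS AND PROOFS =====

-- proof-only helper: the left-to-right prefix-sum table
def pvPrefixSums : Int → List Int → List Int
  | _, [] => []
  | s, t :: ts => (s + t) :: pvPrefixSums (s + t) ts

-- proof-only helper: both ports are shown equal to this masked prefix-sum table
def pvMasked (xs : List Int) : List Int :=
  List.zipWith (fun t a => if t ≠ 0 then a else 0) xs (pvPrefixSums 0 xs)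

-- proof-only helper: what B's loop body builds, as structural recursion
def pvBuild : List Int → Int → List Int
  | [], _ => []
  | t :: ts, r => (if t ≠ 0 then r else 0) :: pvBuild ts (r - t)

theorem length_pvPrefixSums (s : Int) (xs : List Int) : (pvPrefixSums s xs).length = xs.length := by
  induction xs generalizing s with
  | nil => rfl
  | cons t ts ih => simp [pvPrefixSums, ih]

theorem pvPrefixSums_append_singleton (s : Int) (xs : List Int) (y : Int) :
    pvPrefixSums s (xs ++ [y]) = pvPrefixSums s xs ++ [s + xs.sum + y] := by
  induction xs generalizing s with
  | nil => simp [pvPrefixSums]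
  | cons t ts ih => simp [pvPrefixSums, ih]; ring_nf

theorem masked_take_succ (lt : List Int) (k : Nat) (hk : k < lt.length) :
    pvMasked (lt.take (k + 1))
      = pvMasked (lt.take k)
        ++ [if lt[k] ≠ 0 then (lt.take k).sum + lt[k] else 0] := by
  have htake : lt.take (k + 1) = lt.take k ++ [lt[k]] := by
    rw [List.take_add_one]; simp [List.getElem?_eq_getElem hk]
  rw [htake]
  unfold pvMasked
  rw [pvPrefixSums_append_singleton]
  rw [List.zipWith_append (h := by rw [length_pvPrefixSums])]
  simp

-- A-side loop invariant: after the first k iterations, the depth list is the masked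
-- prefix-sum table of the first k layers padded with zeros, and the running total is
-- the plain prefix sum
theorem loop_inv (lt : List Int) (k : Nat) (hk : k ≤ lt.length) :
    (PySem.List.pyRange 0 (k : Int) 1).foldl
      (fun (st : List Int × Int) (z : Int) =>
        let v := PySem.List.pyGetD lt z 0
        if v ≠ 0 then
          (PySem.List.pySetD st.1 z (st.2 + v), st.2 + v)
        else
          (PySem.List.pySetD st.1 z 0, st.2))
      (List.replicate lt.length 0, 0)
    = (pvMasked (lt.take k) ++ List.replicate (lt.length - k) 0,
       (lt.take k).sum) := by
  induction k with
  | zero => simp [pvMasked, pvPrefixSums]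
  | succ k ih =>
    have hk' : k ≤ lt.length := Nat.le_of_succ_le hk
    have hklt : k < lt.length := hk
    have hcast : ((k : Int) + 1) = ((k + 1 : Nat) : Int) := by push_cast; ring
    rw [← hcast, PySem.List.pyRange_one_succ_right (by positivity), List.foldl_append, ih hk']
    have hv : PySem.List.pyGetD lt (k : Int) 0 = lt[k] := by
      rw [PySem.List.pyGetD_natCast]; exact List.getD_eq_getElem lt 0 hklt
    have hlen : (pvMasked (lt.take k)).length = k := by
      unfold pvMasked
      rw [List.length_zipWith, length_pvPrefixSums]
      simp [Nat.le_of_lt hklt]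
    have hrep : List.replicate (lt.length - k) (0 : Int) = 0 :: List.replicate (lt.length - (k + 1)) 0 := by
      have : lt.length - k = (lt.length - (k + 1)) + 1 := by omega
      rw [this, List.replicate_succ]
    have hset : ∀ x : Int,
        PySem.List.pySetD (pvMasked (lt.take k) ++ List.replicate (lt.length - k) 0) (k : Int) x
          = pvMasked (lt.take k) ++ x :: List.replicate (lt.length - (k + 1)) 0 := by
      intro x
      rw [PySem.List.pySetD_natCast, hrep]
      rw [List.set_append_right _ _ hlen.le]
      simp [hlen]
    rw [masked_take_succ lt k hklt]
    have hsum : (lt.take (k + 1)).sum = (lt.take k).sum + lt[k] := by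
      have : lt.take (k + 1) = lt.take k ++ [lt[k]] := by
        rw [List.take_add_one]; simp [List.getElem?_eq_getElem hklt]
      rw [this, List.sum_append]; simp
    simp only [List.foldl_cons, List.foldl_nil, hv]
    by_cases h0 : lt[k] = 0
    · simp [h0, hset, hsum]
    · simp [h0, hset, hsum]

theorem a_eq_masked (lt : List Int) : layer_thickness2depth lt = pvMasked lt := by
  unfold layer_thickness2depth
  simp only []
  rw [loop_inv lt lt.length (le_refl _)]
  simp

-- B-side: the fold builds exactly pvBuild of the traversed list
theorem foldl_eq_build (ys : List Int) (out : List Int) (r : Int) :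
    ys.foldl
      (fun (st : List Int × Int) (t : Int) =>
        (st.1 ++ [if t ≠ 0 then st.2 else 0], st.2 - t))
      (out, r)
    = (out ++ pvBuild ys r, r - ys.sum) := by
  induction ys generalizing out r with
  | nil => simp [pvBuild]
  | cons t ts ih =>
    simp only [List.foldl_cons]
    rw [ih]
    simp [pvBuild]
    ring

theorem build_append (as bs : List Int) (r : Int) :
    pvBuild (as ++ bs) r = pvBuild as r ++ pvBuild bs (r - as.sum) := by
  induction as generalizing r with
  | nil => simp [pvBuild]
  | cons t ts ih =>
    simp [pvBuild, ih]
    ring_nf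

-- the reversed build over the reversed list is the masked prefix-sum table
theorem build_reverse (xs : List Int) (r : Int) :
    (pvBuild xs.reverse r).reverse
      = List.zipWith (fun t a => if t ≠ 0 then a else 0) xs (pvPrefixSums (r - xs.sum) xs) := by
  induction xs generalizing r with
  | nil => simp [pvBuild]
  | cons t ts ih =>
    have : (t :: ts).reverse = ts.reverse ++ [t] := by simp
    rw [this, build_append]
    simp only [List.reverse_append, List.sum_reverse]
    rw [ih]
    have h1 : r - (t :: ts).sum + t = r - ts.sum := by simp [List.sum_cons]; ring
    simp [pvBuild, pvPrefixSums]
    constructor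
    · split_ifs <;> [rfl; ring]
    · rw [show r - (t + ts.sum) + t = r - ts.sum by ring]

theorem b_eq_masked (lt : List Int) : layer_thickness2depth_alt lt = pvMasked lt := by
  unfold layer_thickness2depth_alt pvMasked
  simp only []
  rw [foldl_eq_build]
  simp only [List.nil_append]
  rw [build_reverse]
  simp

-- ===== VERDICT (by name: the statement is the Claim_ definition above) =====
theorem layer_thickness2depth_spec : Claim_equal_layer_thickness2depth := by
  intro lt _
  unfold Spec_layer_thickness2depth
  rw [a_eq_masked, b_eq_masked]
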